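-- pv_equiv track=rewrite | github.com/zenovak/2100-AAA | dsl.py | _parse_connection
-- ===== SOURCE A (Python) =====
-- from typing import Dict, List, Any, Union, Optional, Callable
-- from enum import Enum
--
-- class ConnectionType(Enum):
--     SEQUENCE = "-->"
--     CONDITION_TRUE = "==>"
--     CONDITION_FALSE = "=/>"
--     VARIABLE_BINDING = ":="
--
-- def _parse_connection(line: str) -> Dict[str, str]:
--     """Parse a connection between nodes"""
--     if "-->" in line:
--         source, target = [part.strip() for part in line.split("-->", 1)]
--         conn_type = ConnectionType.SEQUENCE
--     elif "==>" in line: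
--         source, target = [part.strip() for part in line.split("==>", 1)]
--         conn_type = ConnectionType.CONDITION_TRUE
--     elif "=/>" in line:
--         source, target = [part.strip() for part in line.split("=/>", 1)]
--         conn_type = ConnectionType.CONDITION_FALSE
--     else:
--         raise ValueError(f"Invalid connection format: {line}")
--
--     return {
--         "source": source,
--         "target": target,
--         "type": conn_type.value
--     }
-- ===== SOURCE B (Python) =====
-- from enum import Enum
--
-- class ConnectionType(Enum):
--     SEQUENCE = "-->"
--     CONDITION_TRUE = "==>"
--     CONDITION_FALSE = "=/>"
--     VARIABLE_BINDING = ":="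
--
-- def _parse_connection(line: str):
--     """Single left-to-right scan recording the first position of each delimiter,
--     then cut the line by slicing at the chosen position (no substring search / split)."""
--     i_seq = i_true = i_false = -1
--     for i in range(len(line)):
--         tri = line[i:i + 3]
--         if tri == "-->":
--             if i_seq < 0:
--                 i_seq = i
--         elif tri == "==>":
--             if i_true < 0:
--                 i_true = i
--         elif tri == "=/>":
--             if i_false < 0:
--                 i_false = i
--     if i_seq >= 0:
--         cut, value = i_seq, ConnectionType.SEQUENCE.value
--     elif i_true >= 0:
--         cut, value = i_true, ConnectionType.CONDITION_TRUE.value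
--     elif i_false >= 0:
--         cut, value = i_false, ConnectionType.CONDITION_FALSE.value
--     else:
--         raise ValueError(f"Invalid connection format: {line}")
--     return {"source": line[:cut].strip(), "target": line[cut + 3:].strip(), "type": value}
-- ===== Notes on version B (the rewrite author's own statement) =====
-- stated objective: alternative
-- what changed: Replaces three substring searches plus split() by a single left-to-right character scan that records the first position of each delimiter and then cuts the line by slicing at the chosen position.
import Mathlib
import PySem

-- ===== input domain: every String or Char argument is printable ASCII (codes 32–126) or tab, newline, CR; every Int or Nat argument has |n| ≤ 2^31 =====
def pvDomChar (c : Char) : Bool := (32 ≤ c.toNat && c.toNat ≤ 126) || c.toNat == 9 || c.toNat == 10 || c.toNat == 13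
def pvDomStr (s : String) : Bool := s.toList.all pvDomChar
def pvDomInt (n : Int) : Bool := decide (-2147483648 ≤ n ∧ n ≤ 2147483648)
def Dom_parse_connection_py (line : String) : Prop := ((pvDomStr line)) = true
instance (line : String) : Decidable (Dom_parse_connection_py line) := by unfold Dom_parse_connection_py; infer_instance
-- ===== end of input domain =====

-- B replaces the three substring-search-and-split branches by ONE character scan that records the
-- first position of each delimiter and then cuts the line by slicing; same return value. (alternative)

-- ===== PORT A =====
-- if/elif chain, each branch: 'delim in line' then split(delim, 1), strip both parts
def parse_connection_py (line : String) : List (String × String) :=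
  if PySem.Str.isIn "-->" line then
    let parts := ((PySem.Str.splitMax? line "-->" 1).getD []).map PySem.Str.strip
    [("source", parts.getD 0 ""), ("target", parts.getD 1 ""), ("type", "-->")]
  else if PySem.Str.isIn "==>" line then
    let parts := ((PySem.Str.splitMax? line "==>" 1).getD []).map PySem.Str.strip
    [("source", parts.getD 0 ""), ("target", parts.getD 1 ""), ("type", "==>")]
  else if PySem.Str.isIn "=/>" line then
    let parts := ((PySem.Str.splitMax? line "=/>" 1).getD []).map PySem.Str.strip
    [("source", parts.getD 0 ""), ("target", parts.getD 1 ""), ("type", "=/>")]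
  else []  -- Python raises ValueError here; excluded by Pre_

-- ===== PORT B =====
-- the scan loop of Source B: for i in range(len(line)): tri = line[i:i+3]; record first hit per delimiter
def pvScan : List Char → Nat → Int → Int → Int → Int × Int × Int
  | [], _, a, b, c => (a, b, c)
  | l@(_ :: rest), i, a, b, c =>
    if l.take 3 = ['-', '-', '>'] then
      pvScan rest (i + 1) (if a < 0 then (i : Int) else a) b c
    else if l.take 3 = ['=', '=', '>'] then
      pvScan rest (i + 1) a (if b < 0 then (i : Int) else b) c
    else if l.take 3 = ['=', '/', '>'] then
      pvScan rest (i + 1) a b (if c < 0 then (i : Int) else c)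
    else pvScan rest (i + 1) a b c

-- the returned dict: line[:cut].strip(), line[cut+3:].strip()
def pvMk (s : List Char) (cut : Int) (v : String) : List (String × String) :=
  [("source", String.ofList (PySem.Chars.strip (s.take cut.toNat))),
   ("target", String.ofList (PySem.Chars.strip (s.drop (cut.toNat + 3)))),
   ("type", v)]

def parse_connection_py_alt (line : String) : List (String × String) :=
  let s := line.toList
  let r := pvScan s 0 (-1) (-1) (-1)
  if 0 ≤ r.1 then pvMk s r.1 "-->"
  else if 0 ≤ r.2.1 then pvMk s r.2.1 "==>"
  else if 0 ≤ r.2.2 then pvMk s r.2.2 "=/>"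
  else []  -- Python raises ValueError here; excluded by Pre_

-- ===== PRECONDITION & SPEC =====
-- Pre_ excludes exactly the lines containing none of the three delimiters, on which A raises ValueError
def Pre_parse_connection_py (line : String) : Prop :=
  PySem.Str.isIn "-->" line = true ∨ PySem.Str.isIn "==>" line = true ∨ PySem.Str.isIn "=/>" line = true
instance (line : String) : Decidable (Pre_parse_connection_py line) := by unfold Pre_parse_connection_py; infer_instance
def pvWitness_parse_connection_py : String := "a --> b"

def Spec_parse_connection_py (line : String) (out : List (String × String)) : Prop := out = parse_connection_py_alt line
instance (line : String) (out : List (String × String)) : Decidable (Spec_parse_connection_py line out) := by unfold Spec_parse_connection_py; infer_instance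

-- ===== CLAIM =====
def Claim_equal_parse_connection_py : Prop := ∀ (line : String), Dom_parse_connection_py line → Pre_parse_connection_py line → Spec_parse_connection_py line (parse_connection_py line)

-- ===== LEMMAS AND PROOFS =====

-- the common characterisation: first index (if any) at which d is a prefix of the remaining suffix
def pvFirstIdx (d : List Char) : List Char → Option Nat
  | [] => none
  | l@(_ :: t) => if d.isPrefixOf l then some 0 else (pvFirstIdx d t).map (· + 1)

-- A's substring search finds exactly pvFirstIdx
lemma pv_find_go (d : List Char) (hd : d ≠ []) :
    ∀ (l : List Char) (i : Nat), PySem.Chars.find.go d l i =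
      (match pvFirstIdx d l with | none => (-1 : Int) | some j => ((i + j : Nat) : Int)) := by
  intro l
  induction l with
  | nil => intro i; simp [PySem.Chars.find.go, pvFirstIdx, List.isEmpty_iff, hd]
  | cons c t ih =>
    intro i
    simp only [PySem.Chars.find.go, pvFirstIdx]
    by_cases hp : d.isPrefixOf (c :: t)
    · simp [hp]
    · simp only [hp, ih (i + 1)]
      cases pvFirstIdx d t with
      | none => simp
      | some j => simp only [Option.map_some]; push_cast; ring

lemma pv_isIn (d : List Char) (hd : d ≠ []) (l : List Char) :
    PySem.Chars.isIn d l = (pvFirstIdx d l).isSome := by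
  simp only [PySem.Chars.isIn, PySem.Chars.find, pv_find_go d hd l 0]
  cases pvFirstIdx d l with
  | none => simp
  | some j => simp

-- once maxsplit is exhausted the rest of the line is the last piece
lemma pv_split_go0 (d : List Char) (fuel : Nat) (l : List Char) (acc : List (List Char)) :
    PySem.Chars.splitOnMax.go d fuel 0 l [] acc = (l :: acc).reverse := by
  cases fuel with
  | zero => simp [PySem.Chars.splitOnMax.go]
  | succ f => cases l with
    | nil => simp [PySem.Chars.splitOnMax.go]
    | cons c t => simp [PySem.Chars.splitOnMax.go]

-- split(sep, 1) cuts at the first occurrence pvFirstIdx points to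
lemma pv_split_go (d : List Char) :
    ∀ (l : List Char) (fuel : Nat) (cur : List Char) (acc : List (List Char)),
      l.length < fuel →
      PySem.Chars.splitOnMax.go d fuel 1 l cur acc =
        (match pvFirstIdx d l with
          | none => ((cur.reverse ++ l) :: acc).reverse
          | some j => (l.drop (j + d.length) :: (cur.reverse ++ l.take j) :: acc).reverse) := by
  intro l
  induction l with
  | nil =>
    intro fuel cur acc h
    cases fuel with
    | zero => omega
    | succ f => simp [PySem.Chars.splitOnMax.go, pvFirstIdx]
  | cons c t ih =>
    intro fuel cur acc h
    cases fuel with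
    | zero => omega
    | succ f =>
      simp only [pvFirstIdx]
      by_cases hp : d.isPrefixOf (c :: t)
      · simp only [PySem.Chars.splitOnMax.go, hp, if_true]
        rw [pv_split_go0]
        simp
      · simp only [PySem.Chars.splitOnMax.go, hp]
        have hlt : t.length < f := by simp at h; omega
        rw [ih f (c :: cur) acc hlt]
        cases hfi : pvFirstIdx d t with
        | none => simp
        | some j =>
          have hje : j + 1 + d.length = (j + d.length) + 1 := by omega
          simp [hje]

-- a length-3 pattern is a prefix iff the 3-character window equals it
lemma pv_prefix_take (d l : List Char) (h3 : d.length = 3) :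
    d.isPrefixOf l = true ↔ l.take 3 = d := by
  rw [List.isPrefixOf_iff_prefix]
  constructor
  · rintro ⟨r, rfl⟩; rw [← h3, List.take_left]
  · intro ht; exact ht ▸ List.take_prefix 3 l

-- value of one scan component: first recorded index, else the accumulator
def pvSel (a : Int) (d l : List Char) (i : Nat) : Int :=
  if a < 0 then (match pvFirstIdx d l with | none => a | some j => ((i + j : Nat) : Int)) else a

lemma pvSel_cons (a : Int) (d : List Char) (x : Char) (t : List Char) (i : Nat) :
    pvSel a d (x :: t) i =
      pvSel (if d.isPrefixOf (x :: t) = true ∧ a < 0 then (i : Int) else a) d t (i + 1) := by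
  unfold pvSel
  by_cases hp : d.isPrefixOf (x :: t) = true
  · by_cases ha : a < 0
    · simp [pvFirstIdx, hp, ha]
    · simp [hp, ha]
  · by_cases ha : a < 0
    · simp only [pvFirstIdx, hp, if_false, Bool.false_eq_true, false_and, ha, ite_true]
      cases pvFirstIdx d t with
      | none => simp
      | some j => simp; omega
    · simp [ha]

lemma pv_scan (l : List Char) :
    ∀ (i : Nat) (a b c : Int),
      pvScan l i a b c =
        (pvSel a ['-', '-', '>'] l i, pvSel b ['=', '=', '>'] l i, pvSel c ['=', '/', '>'] l i) := by
  induction l with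
  | nil => intro i a b c; simp [pvScan, pvSel, pvFirstIdx]
  | cons x t ih =>
    intro i a b c
    have hA := pv_prefix_take ['-', '-', '>'] (x :: t) rfl
    have hB := pv_prefix_take ['=', '=', '>'] (x :: t) rfl
    have hC := pv_prefix_take ['=', '/', '>'] (x :: t) rfl
    rw [pvSel_cons a, pvSel_cons b, pvSel_cons c]
    simp only [pvScan]
    by_cases h1 : (x :: t).take 3 = ['-', '-', '>']
    · have hpB : ¬ (['=', '=', '>'] : List Char).isPrefixOf (x :: t) = true := by
        intro hc; rw [hB.1 hc] at h1; simp at h1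
      have hpC : ¬ (['=', '/', '>'] : List Char).isPrefixOf (x :: t) = true := by
        intro hc; rw [hC.1 hc] at h1; simp at h1
      simp [h1, ih, hA.2 h1, hpB, hpC]
    · by_cases h2 : (x :: t).take 3 = ['=', '=', '>']
      · have hpA : ¬ (['-', '-', '>'] : List Char).isPrefixOf (x :: t) = true := by
          intro hc; rw [hA.1 hc] at h2; simp at h2
        have hpC : ¬ (['=', '/', '>'] : List Char).isPrefixOf (x :: t) = true := by
          intro hc; rw [hC.1 hc] at h2; simp at h2
        simp [h2, ih, hB.2 h2, hpA, hpC]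
      · by_cases h3 : (x :: t).take 3 = ['=', '/', '>']
        · have hpA : ¬ (['-', '-', '>'] : List Char).isPrefixOf (x :: t) = true := by
            intro hc; rw [hA.1 hc] at h3; simp at h3
          have hpB : ¬ (['=', '=', '>'] : List Char).isPrefixOf (x :: t) = true := by
            intro hc; rw [hB.1 hc] at h3; simp at h3
          simp [h3, ih, hC.2 h3, hpA, hpB]
        · simp only [List.take_succ_cons, List.cons.injEq] at h1 h2 h3
          have n1 : ¬('-' = x ∧ ['-', '>'] <+: t) :=
            fun h => h1 ⟨h.1.symm, (List.prefix_iff_eq_take.1 h.2).symm⟩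
          have n2 : ¬('=' = x ∧ ['=', '>'] <+: t) :=
            fun h => h2 ⟨h.1.symm, (List.prefix_iff_eq_take.1 h.2).symm⟩
          have n3 : ¬('=' = x ∧ ['/', '>'] <+: t) :=
            fun h => h3 ⟨h.1.symm, (List.prefix_iff_eq_take.1 h.2).symm⟩
          simp [ih, h1, h2, h3, n1, n2, n3]

-- A's branch body equals pvMk when the delimiter first occurs at index j
lemma pv_branch (line dstr v : String) (j : Nat) (hd : dstr.toList ≠ []) (h3 : dstr.toList.length = 3)
    (hj : pvFirstIdx dstr.toList line.toList = some j) :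
    (let parts := ((PySem.Str.splitMax? line dstr 1).getD []).map PySem.Str.strip
     [(("source" : String), parts.getD 0 ""), ("target", parts.getD 1 ""), ("type", v)])
      = pvMk line.toList (j : Int) v := by
  have hsp : PySem.Chars.splitMax? line.toList dstr.toList 1
      = some [line.toList.take j, line.toList.drop (j + 3)] := by
    simp only [PySem.Chars.splitMax?, List.isEmpty_iff, hd, if_false]
    rw [show (PySem.Chars.splitOnMax line.toList dstr.toList 1)
        = PySem.Chars.splitOnMax.go dstr.toList (line.toList.length + 1) 1 line.toList [] [] by
      simp [PySem.Chars.splitOnMax]]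
    rw [pv_split_go dstr.toList line.toList (line.toList.length + 1) [] [] (by omega), hj]
    simp [h3]
  simp only [PySem.Str.splitMax?, hsp]
  simp [pvMk, PySem.Str.strip]

-- ===== VERDICT =====
theorem parse_connection_py_spec : Claim_equal_parse_connection_py := by
  intro line _ hpre
  unfold Spec_parse_connection_py
  have e1 : ("-->" : String).toList = ['-', '-', '>'] := rfl
  have e2 : ("==>" : String).toList = ['=', '=', '>'] := rfl
  have e3 : ("=/>" : String).toList = ['=', '/', '>'] := rfl
  simp only [parse_connection_py, parse_connection_py_alt, PySem.Str.isIn_eq, e1, e2, e3]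
  rw [pv_isIn ['-','-','>'] (by simp) line.toList,
      pv_isIn ['=','=','>'] (by simp) line.toList,
      pv_isIn ['=','/','>'] (by simp) line.toList,
      pv_scan line.toList 0 (-1) (-1) (-1)]
  cases hjA : pvFirstIdx ['-','-','>'] line.toList with
  | some j =>
    have hb := pv_branch line "-->" "-->" j (by simp) rfl hjA
    simp only [pvSel, hjA] at *
    simp only [show ((0:Nat) + j : Nat) = j from by omega] at *
    simpa using hb
  | none =>
    cases hjB : pvFirstIdx ['=','=','>'] line.toList with
    | some j =>
      have hb := pv_branch line "==>" "==>" j (by simp) rfl hjB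
      simp only [pvSel, hjA, hjB] at *
      simp only [show ((0:Nat) + j : Nat) = j from by omega] at *
      simpa using hb
    | none =>
      cases hjC : pvFirstIdx ['=','/','>'] line.toList with
      | some j =>
        have hb := pv_branch line "=/>" "=/>" j (by simp) rfl hjC
        simp only [pvSel, hjA, hjB, hjC] at *
        simp only [show ((0:Nat) + j : Nat) = j from by omega] at *
        simpa using hb
      | none =>
        exfalso
        simp only [Pre_parse_connection_py, PySem.Str.isIn_eq, e1, e2, e3] at hpre
        rw [pv_isIn ['-','-','>'] (by simp) line.toList,
            pv_isIn ['=','=','>'] (by simp) line.toList,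
            pv_isIn ['=','/','>'] (by simp) line.toList] at hpre
        simp [hjA, hjB, hjC] at hpre
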